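-- pv_equiv track=rewrite | github.com/opd/homedir | HOME/_bin/format_python.py | handle_dummy_indentation
-- ===== SOURCE A (Python) =====
-- BEFORE_MARK = "LALA"
--
-- MARK = "OLOLO"
--
-- def handle_dummy_indentation(lines):
--     lines = iter(lines)
--     for line in lines:
--         if MARK in line:
--             break
--
--         if BEFORE_MARK not in line:
--             yield line
--             break
--     for line in lines:
--         yield line
-- ===== SOURCE B (Python) =====
-- BEFORE_MARK = "LALA"
--
-- MARK = "OLOLO"
--
-- def handle_dummy_indentation(lines):
--     # No skipping loop at all: find the first MARK line and the first non-LALA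
--     # line independently, then emit one slice chosen by comparing the indices.
--     buf = list(lines)
--     n = len(buf)
--     i_mark = next((i for i, l in enumerate(buf) if MARK in l), n)
--     i_keep = next((i for i, l in enumerate(buf) if BEFORE_MARK not in l), n)
--     if i_mark <= i_keep:
--         yield from buf[i_mark + 1:]
--     else:
--         yield from buf[i_keep:]
-- ===== Notes on version B (the rewrite author's own statement) =====
-- stated objective: alternative
-- what changed: A is a stateful skip loop over a shared iterator; B does two independent index searches (first MARK line, first non-LALA line) and returns a single slice selected by comparing the two indices.
import Mathlib
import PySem

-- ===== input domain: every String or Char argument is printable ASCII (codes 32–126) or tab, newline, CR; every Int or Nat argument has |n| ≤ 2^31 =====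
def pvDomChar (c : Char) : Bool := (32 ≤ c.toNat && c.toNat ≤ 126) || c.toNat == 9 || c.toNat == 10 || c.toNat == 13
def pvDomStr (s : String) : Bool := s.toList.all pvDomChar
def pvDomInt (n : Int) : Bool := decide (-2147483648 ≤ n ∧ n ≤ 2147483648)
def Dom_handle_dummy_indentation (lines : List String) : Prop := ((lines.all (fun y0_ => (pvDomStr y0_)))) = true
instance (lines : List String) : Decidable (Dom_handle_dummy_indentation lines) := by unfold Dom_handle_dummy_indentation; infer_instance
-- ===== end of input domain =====

-- B replaces A's stateful skip loop over a shared iterator by two independent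
-- index searches plus one slice selected by comparing the indices — objective: alternative.

-- ===== PORT A =====
-- first loop with its two breaks becomes the recursion; after a break the
-- remaining iterator contents are yielded by the second loop (= the tail).
def handle_dummy_indentation (lines : List String) : List String :=
  match lines with
  | [] => []
  | l :: rest =>
    if PySem.Str.isIn "OLOLO" l then rest
    else if !(PySem.Str.isIn "LALA" l) then l :: rest
    else handle_dummy_indentation rest

-- ===== PORT B =====
-- Source B's two next(enumerate…) searches (default n = not found) are List.findIdx
-- (which returns the length when no element matches); buf[i:] is List.drop.
def handle_dummy_indentation_alt (lines : List String) : List String :=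
  let i_mark := lines.findIdx (fun l => PySem.Str.isIn "OLOLO" l)
  let i_keep := lines.findIdx (fun l => !(PySem.Str.isIn "LALA" l))
  if i_mark ≤ i_keep then lines.drop (i_mark + 1) else lines.drop i_keep

-- ===== PRECONDITION & SPEC =====
def Spec_handle_dummy_indentation (lines : List String) (out : List String) : Prop := out = handle_dummy_indentation_alt lines
instance (lines : List String) (out : List String) : Decidable (Spec_handle_dummy_indentation lines out) := by unfold Spec_handle_dummy_indentation; infer_instance

-- ===== CLAIM (what is proved, stated in full; the proofs are below) =====
def Claim_equal_handle_dummy_indentation : Prop := ∀ (lines : List String), Dom_handle_dummy_indentation lines → Spec_handle_dummy_indentation lines (handle_dummy_indentation lines)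

-- ===== LEMMAS AND PROOFS =====
theorem hdi_eq (lines : List String) : handle_dummy_indentation lines = handle_dummy_indentation_alt lines := by
  induction lines with
  | nil => rfl
  | cons l rest ih =>
    cases ho : PySem.Chars.isIn ['O','L','O','L','O'] l.toList <;>
      cases hb : PySem.Chars.isIn ['L','A','L','A'] l.toList <;>
      simp [handle_dummy_indentation, handle_dummy_indentation_alt, List.findIdx_cons,
        PySem.Str.isIn, ho, hb, ih]

-- ===== VERDICT (by name: the statement is the Claim_ definition above) =====
theorem handle_dummy_indentation_spec : Claim_equal_handle_dummy_indentation := by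
  intro lines _
  exact hdi_eq lines
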